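-- pv_equiv track=rewrite | github.com/Swixixle/Sweeps_Scout | src/sweep_scout/utils.py | host_in_denylist
-- ===== SOURCE A (Python) =====
-- def strip_www(host: str) -> str:
--     h = host.lower().strip(".")
--     if h.startswith("www."):
--         return h[4:]
--     return h
--
-- def normalize_host(host: str) -> str:
--     if not host:
--         return ""
--     host = host.strip().lower().strip(".")
--     if "@" in host:
--         return ""
--     if ":" in host:
--         host = host.split(":")[0]
--     return strip_www(host)
--
-- def host_in_denylist(host: str, deny: list[str]) -> bool:
--     h = normalize_host(host)
--     for d in deny:
--         d = normalize_host(d)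
--         if not d:
--             continue
--         if h == d or h.endswith("." + d):
--             return True
--     return False
-- ===== SOURCE B (Python) =====
-- def strip_www(host: str) -> str:
--     h = host.lower().strip(".")
--     if h.startswith("www."):
--         return h[4:]
--     return h
--
-- def normalize_host(host: str) -> str:
--     if not host:
--         return ""
--     host = host.strip().lower().strip(".")
--     if "@" in host:
--         return ""
--     if ":" in host:
--         host = host.split(":")[0]
--     return strip_www(host)
--
-- def host_in_denylist(host: str, deny: list[str]) -> bool:
--     denyset = {nd for nd in map(normalize_host, deny) if nd}
--     h = normalize_host(host)
--     candidates = [h] + [h[i + 1:] for i, c in enumerate(h) if c == "."]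
--     return any(c in denyset for c in candidates)
-- ===== Notes on version B (the rewrite author's own statement) =====
-- stated objective: alternative
-- what changed: Instead of testing h == d or h.endswith('.'+d) against every deny entry, B builds a set of the normalized non-empty deny entries once and probes it with the host's dot-boundary suffix candidates (h plus each suffix after a '.'), so the per-entry endswith scan disappears.
import Mathlib
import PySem

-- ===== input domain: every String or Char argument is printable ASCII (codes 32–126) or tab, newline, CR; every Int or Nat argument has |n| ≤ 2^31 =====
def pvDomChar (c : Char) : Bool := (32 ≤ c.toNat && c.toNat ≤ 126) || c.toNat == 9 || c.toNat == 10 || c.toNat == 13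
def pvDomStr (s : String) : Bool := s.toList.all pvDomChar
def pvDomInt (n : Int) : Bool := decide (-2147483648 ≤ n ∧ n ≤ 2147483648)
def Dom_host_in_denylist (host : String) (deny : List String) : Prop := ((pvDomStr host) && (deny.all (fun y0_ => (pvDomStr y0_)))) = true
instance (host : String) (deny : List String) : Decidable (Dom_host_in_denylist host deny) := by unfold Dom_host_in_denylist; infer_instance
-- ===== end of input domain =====

-- B replaces A's per-entry `endswith` scan of the denylist by a set of normalized deny
-- entries probed with the host's dot-boundary suffixes (objective: idiomatic/alternative).

-- ===== PORT A =====
-- shared same-module helpers (both Pythons normalize hosts with exactly this code)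
def stripWww (host : String) : String :=
  let h := PySem.Str.stripChars (PySem.Str.lower host) "."
  if PySem.Str.startswith h "www." then PySem.Str.slice h (some 4) none else h

def normalizeHost (host : String) : String :=
  if host == "" then ""
  else
    let h := PySem.Str.stripChars (PySem.Str.lower (PySem.Str.strip host)) "."
    if PySem.Str.isIn "@" h then ""
    else
      -- host.split(":")[0]: ':' ≠ "" so split? is some, and a split list is never empty,
      -- so the [0] indexing never raises; headD's default is unreachable
      let h := if PySem.Str.isIn ":" h then ((PySem.Str.split? h ":").getD []).headD "" else h
      stripWww h

-- A's for-loop over deny with its early return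
def hidLoop (h : String) : List String → Bool
  | [] => false
  | d :: rest =>
    let nd := normalizeHost d
    if nd == "" then hidLoop h rest
    else if h == nd || PySem.Str.endswith h ("." ++ nd) then true
    else hidLoop h rest

def host_in_denylist (host : String) (deny : List String) : Bool :=
  hidLoop (normalizeHost host) deny

-- ===== PORT B =====
def host_in_denylist_alt (host : String) (deny : List String) : Bool :=
  let denyset : PySem.Set String :=
    PySem.Set.ofList ((deny.map normalizeHost).filter (fun nd => !(nd == "")))
  let h := normalizeHost host
  let candidates :=
    h :: ((PySem.List.enumerate h.toList).filter (fun p => p.2 == '.')).map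
      (fun p => PySem.Str.slice h (some (p.1 + 1)) none)
  candidates.any (fun c => PySem.Set.contains denyset c)

-- ===== PRECONDITION & SPEC =====
def Spec_host_in_denylist (host : String) (deny : List String) (out : Bool) : Prop := out = host_in_denylist_alt host deny
instance (host : String) (deny : List String) (out : Bool) : Decidable (Spec_host_in_denylist host deny out) := by unfold Spec_host_in_denylist; infer_instance

-- ===== CLAIM (what is proved, stated in full; the proofs are below) =====
def Claim_equal_host_in_denylist : Prop := ∀ (host : String) (deny : List String), Dom_host_in_denylist host deny → Spec_host_in_denylist host deny (host_in_denylist host deny)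

-- ===== LEMMAS AND PROOFS =====

-- A's match test `h == d or h.endswith("." + d)`, as a proposition on char lists
lemma hidLoop_eq_true_iff (h : String) (deny : List String) :
    hidLoop h deny = true ↔
      ∃ d ∈ deny, normalizeHost d ≠ "" ∧
        (h = normalizeHost d ∨ ('.' :: (normalizeHost d).toList) <:+ h.toList) := by
  induction deny with
  | nil => simp [hidLoop]
  | cons d rest ih =>
    have he := PySem.Chars.endswith_iff h.toList ('.' :: (normalizeHost d).toList)
    by_cases h1 : normalizeHost d = ""
    · simp [hidLoop, h1, ih]
    · by_cases h2 : h = normalizeHost d ∨ ('.' :: (normalizeHost d).toList) <:+ h.toList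
      · have hl : hidLoop h (d :: rest) = true := by
          simp only [hidLoop]
          simp [h1]
          rcases h2 with h2 | h2
          · exact Or.inl (Or.inl h2)
          · exact Or.inl (Or.inr (he.mpr h2))
        exact iff_of_true hl ⟨d, List.mem_cons_self, h1, h2⟩
      · rw [not_or] at h2
        have hl : hidLoop h (d :: rest) = hidLoop h rest := by
          simp only [hidLoop]
          simp [h1]
          rintro (hc | hc)
          · exact absurd hc h2.1
          · exact absurd (he.mp hc) h2.2
        rw [hl, ih]
        constructor
        · rintro ⟨d', hd', hx⟩
          exact ⟨d', List.mem_cons_of_mem _ hd', hx⟩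
        · rintro ⟨d', hd', hx⟩
          rcases List.mem_cons.mp hd' with rfl | hd'
          · rcases hx.2 with hc | hc
            · exact absurd hc h2.1
            · exact absurd hc h2.2
          · exact ⟨d', hd', hx⟩

-- a dotted suffix of L is exactly a drop just after some '.' of L
lemma suffix_dot_iff (L d : List Char) :
    ('.' :: d) <:+ L ↔ ∃ k, ∃ hk : k < L.length, L[k] = '.' ∧ d = L.drop (k + 1) := by
  constructor
  · rintro ⟨t, rfl⟩
    refine ⟨t.length, by simp, ?_, ?_⟩
    · simp [List.getElem_append_right]
    · have h1 : t ++ '.' :: d = (t ++ ['.']) ++ d := by simp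
      rw [h1, show t.length + 1 = (t ++ ['.']).length by simp, List.drop_left]
  · rintro ⟨k, hk, hdot, rfl⟩
    refine ⟨L.take k, ?_⟩
    have hdrop : L.drop k = L[k] :: L.drop (k + 1) := List.drop_eq_getElem_cons hk
    rw [hdot] at hdrop
    rw [← hdrop, List.take_append_drop]

lemma slice_from_toList (h : String) (k : Nat) :
    (PySem.Str.slice h (some ((k : Int) + 1)) none).toList = h.toList.drop (k + 1) := by
  rw [PySem.Str.toList_slice, PySem.Chars.slice_eq_listSlice,
    show ((k : Int) + 1) = ((k + 1 : Nat) : Int) by push_cast; ring,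
    PySem.List.slice_from_natCast]

-- membership in B's candidate list is A's match proposition
lemma mem_candidates_iff (h c : String) :
    (c = h ∨ ∃ p ∈ (PySem.List.enumerate h.toList).filter (fun p => p.2 == '.'),
        c = PySem.Str.slice h (some (p.1 + 1)) none)
      ↔ (h = c ∨ ('.' :: c.toList) <:+ h.toList) := by
  constructor
  · rintro (rfl | ⟨p, hp, rfl⟩)
    · exact Or.inl rfl
    · right
      simp only [List.mem_filter, PySem.List.mem_enumerate_iff] at hp
      obtain ⟨⟨k, hk, rfl⟩, hdot⟩ := hp
      simp only [beq_iff_eq] at hdot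
      rw [suffix_dot_iff]
      refine ⟨k, hk, hdot, ?_⟩
      show (PySem.Str.slice h (some ((0:Int) + (k : Int) + 1)) none).toList = h.toList.drop (k + 1)
      rw [zero_add, slice_from_toList h k]
  · rintro (rfl | hsuf)
    · exact Or.inl rfl
    · right
      rw [suffix_dot_iff] at hsuf
      obtain ⟨k, hk, hdot, hdrop⟩ := hsuf
      refine ⟨((0:Int) + (k : Int), h.toList[k]), ?_, ?_⟩
      · rw [List.mem_filter]
        refine ⟨?_, by simp [hdot]⟩
        rw [PySem.List.mem_enumerate_iff]
        exact ⟨k, hk, rfl⟩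
      · rw [← String.toList_inj]
        show c.toList = (PySem.Str.slice h (some ((0:Int) + (k : Int) + 1)) none).toList
        rw [zero_add, slice_from_toList h k]
        exact hdrop

lemma alt_eq_true_iff (host : String) (deny : List String) :
    host_in_denylist_alt host deny = true ↔
      ∃ d ∈ deny, normalizeHost d ≠ "" ∧
        (normalizeHost host = normalizeHost d ∨
          ('.' :: (normalizeHost d).toList) <:+ (normalizeHost host).toList) := by
  have hmemS : ∀ c : String,
      PySem.Set.contains
        (PySem.Set.ofList ((deny.map normalizeHost).filter (fun nd => !(nd == "")))) c = true
      ↔ (∃ d ∈ deny, normalizeHost d = c) ∧ ¬ c = "" := by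
    intro c
    rw [PySem.Set.contains_iff, PySem.Set.mem_ofList, List.mem_filter]
    simp [List.mem_map]
  simp only [host_in_denylist_alt]
  rw [List.any_eq_true]
  constructor
  · rintro ⟨c, hc, hS⟩
    rw [hmemS] at hS
    obtain ⟨⟨d, hd, hdc⟩, hne⟩ := hS
    subst hdc
    have hcand : normalizeHost host = normalizeHost d ∨
        ('.' :: (normalizeHost d).toList) <:+ (normalizeHost host).toList := by
      apply (mem_candidates_iff (normalizeHost host) (normalizeHost d)).mp
      rcases List.mem_cons.mp hc with h' | h'
      · exact Or.inl h'
      · obtain ⟨p, hp, hpc⟩ := List.mem_map.mp h'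
        exact Or.inr ⟨p, hp, hpc.symm⟩
    exact ⟨d, hd, hne, hcand⟩
  · rintro ⟨d, hd, hne, hmatch⟩
    refine ⟨normalizeHost d, ?_, ?_⟩
    · rcases (mem_candidates_iff (normalizeHost host) (normalizeHost d)).mpr hmatch with h' | ⟨p, hp, hpc⟩
      · exact List.mem_cons.mpr (Or.inl h')
      · exact List.mem_cons.mpr (Or.inr (List.mem_map.mpr ⟨p, hp, hpc.symm⟩))
    · rw [hmemS]
      exact ⟨⟨d, hd, rfl⟩, hne⟩

-- ===== VERDICT (by name: the statement is the Claim_ definition above) =====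
theorem host_in_denylist_spec : Claim_equal_host_in_denylist := by
  intro host deny _
  unfold Spec_host_in_denylist
  rw [Bool.eq_iff_iff]
  rw [show host_in_denylist host deny = hidLoop (normalizeHost host) deny from rfl]
  rw [hidLoop_eq_true_iff, alt_eq_true_iff]
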